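-- pv_equiv track=rewrite | github.com/mayurpai/Coding | pothole.py | miniPatches
-- ===== SOURCE A (Python) =====
-- def miniPatches(S):
--     potHoles = {}
--     for i, segment in enumerate(S):
--         if segment != 'X':
--             continue
--         if (i-1 in potHoles) or (i-2) in potHoles:
--             continue
--         potHoles[i] = 1
--     return sum(potHoles.values())
-- ===== SOURCE B (Python) =====
-- def miniPatches(S):
--     i = S.find('X')
--     if i == -1:
--         return 0
--     return 1 + miniPatches(S[i + 3:])
-- ===== Notes on version B (the rewrite author's own statement) =====
-- stated objective: simpler
-- what changed: Replaces the single enumerate scan with a dict of patch-start indices and a final sum by a recursive jump strategy: str.find locates the next pothole, one patch is counted, and the function recurses on the slice starting three positions after it; no per-character state is kept.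
import Mathlib
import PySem

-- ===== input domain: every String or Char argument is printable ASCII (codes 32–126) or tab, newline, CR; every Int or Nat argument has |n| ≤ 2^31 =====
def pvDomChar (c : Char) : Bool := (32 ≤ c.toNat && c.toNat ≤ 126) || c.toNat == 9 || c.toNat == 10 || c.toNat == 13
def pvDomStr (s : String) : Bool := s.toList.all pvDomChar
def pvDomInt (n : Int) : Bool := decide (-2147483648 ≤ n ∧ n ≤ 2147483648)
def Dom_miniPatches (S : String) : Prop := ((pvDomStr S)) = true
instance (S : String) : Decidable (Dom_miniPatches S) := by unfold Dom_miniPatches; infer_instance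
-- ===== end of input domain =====

-- B replaces A's enumerate scan with a dict of patch indices by a recursive jump strategy:
-- find the next 'X', count one patch, recurse on the slice three positions past it.

-- ===== PORT A =====
def miniPatches (S : String) : Int :=
  let potHoles : PySem.Dict Int Int :=
    (PySem.List.enumerate S.toList 0).foldl
      (fun d p =>
        if p.2 ≠ 'X' then d
        else if d.contains (p.1 - 1) || d.contains (p.1 - 2) then d
        else d.insert p.1 1)
      PySem.Dict.empty
  potHoles.values.sum

-- ===== PORT B =====
-- S.find('X') → List.findIdx? on the character list; the slice S[i+3:] → List.drop (i+3)
def miniPatchesGo (L : List Char) : Int :=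
  match h : L.findIdx? (· == 'X') with
  | none => 0
  | some i => 1 + miniPatchesGo (L.drop (i + 3))
termination_by L.length
decreasing_by
  have hi := (List.findIdx?_eq_some_iff_getElem.1 h).1
  simp only [List.length_drop]
  omega

def miniPatches_alt (S : String) : Int := miniPatchesGo S.toList

-- ===== PRECONDITION & SPEC =====
def Spec_miniPatches (S : String) (out : Int) : Prop := out = miniPatches_alt S
instance (S : String) (out : Int) : Decidable (Spec_miniPatches S out) := by unfold Spec_miniPatches; infer_instance

-- ===== CLAIM (what is proved, stated in full; the proofs are below) =====
def Claim_equal_miniPatches : Prop := ∀ (S : String), Dom_miniPatches S → Spec_miniPatches S (miniPatches S)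

-- ===== LEMMAS AND PROOFS =====

theorem miniPatchesGo_eq (L : List Char) :
    miniPatchesGo L =
      match L.findIdx? (· == 'X') with
      | none => 0
      | some i => 1 + miniPatchesGo (L.drop (i + 3)) := by
  rw [miniPatchesGo]
  split <;> rename_i h <;> rw [h]

theorem miniPatchesGo_nil : miniPatchesGo [] = 0 := by
  rw [miniPatchesGo_eq]
  simp [List.findIdx?_nil]

theorem miniPatchesGo_cons_X (L : List Char) :
    miniPatchesGo ('X' :: L) = 1 + miniPatchesGo (L.drop 2) := by
  rw [miniPatchesGo_eq]
  simp [List.findIdx?_cons]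

theorem miniPatchesGo_cons_ne (x : Char) (L : List Char) (hx : x ≠ 'X') :
    miniPatchesGo (x :: L) = miniPatchesGo L := by
  rw [miniPatchesGo_eq, miniPatchesGo_eq]
  simp only [List.findIdx?_cons, beq_iff_eq, if_neg hx]
  cases h : L.findIdx? (· == 'X') with
  | none => simp
  | some i => simp [List.drop_succ_cons]

theorem miniPatches_main (L : List Char) (s : Int) (d : PySem.Dict Int Int) (reach : Int)
    (hs : 0 ≤ s)
    (hkeys : ∀ k ∈ d.keys, k ≤ reach - 2)
    (hreach : reach ≤ s + 1)
    (hcase : (d.keys = [] ∧ reach = -1) ∨ reach - 2 ∈ d.keys) :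
    ((PySem.List.enumerate L s).foldl
      (fun d p =>
        if p.2 ≠ 'X' then d
        else if d.contains (p.1 - 1) || d.contains (p.1 - 2) then d
        else d.insert p.1 1) d).values.sum
    = d.values.sum + miniPatchesGo (L.drop ((reach + 1 - s).toNat)) := by
  induction L generalizing s d reach with
  | nil => simp [PySem.List.enumerate_nil, miniPatchesGo_nil]
  | cons x L ih =>
    rw [PySem.List.enumerate_cons]
    simp only [List.foldl_cons]
    by_cases hr : reach < s
    · -- the head is uncovered: drop count is 0
      have hk0 : (reach + 1 - s).toNat = 0 := by omega
      rw [hk0, List.drop_zero]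
      by_cases hx : x = 'X'
      · subst hx
        -- A places a patch here
        have hcontF : ∀ j : Int, reach - 2 < j → d.contains j = false := by
          intro j hj
          by_contra h
          have : j ∈ d.keys := (PySem.Dict.contains_iff_mem_keys _ _).1 (by simpa using h)
          have := hkeys j this
          omega
        have h1 : d.contains (s - 1) = false := hcontF _ (by omega)
        have h2 : d.contains (s - 2) = false := hcontF _ (by omega)
        have hsF : d.contains s = false := hcontF _ (by omega)
        simp only [ne_eq, not_true_eq_false, if_false, h1, h2, Bool.or_self,
          Bool.false_eq_true]
        have hitems := PySem.Dict.items_insert_of_not_contains (d := d) (k := s) (v := 1) hsF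
        have hkeys' : (d.insert s 1).keys = d.keys ++ [s] :=
          PySem.Dict.keys_insert_of_not_contains (d := d) (k := s) (v := 1) hsF
        have hsum : (d.insert s 1).values.sum = d.values.sum + 1 := by
          simp [PySem.Dict.values, hitems]
        have := ih (s + 1) (d.insert s 1) (s + 2) (by omega)
          (by intro k hk; rw [hkeys'] at hk
              rcases List.mem_append.1 hk with h | h
              · have := hkeys k h; omega
              · simp at h; omega)
          (by omega)
          (Or.inr (by rw [hkeys']; simp))
        rw [this, hsum, miniPatchesGo_cons_X]
        have : (s + 2 + 1 - (s + 1)).toNat = 2 := by omega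
        rw [this]
        ring
      · -- not a pothole: both skip
        rw [if_pos (by simpa using hx)]
        have := ih (s + 1) d reach (by omega) hkeys (by omega) hcase
        have hk0' : (reach + 1 - (s + 1)).toNat = 0 := by omega
        rw [hk0', List.drop_zero] at this
        rw [this, miniPatchesGo_cons_ne x L hx]
    · -- the head is covered by the last patch: A skips it too
      rcases hcase with ⟨hk0, hrm⟩ | hmem
      · omega
      have hk : (reach + 1 - s).toNat = ((reach + 1 - (s + 1)).toNat) + 1 := by omega
      have hdrop : (x :: L).drop ((reach + 1 - s).toNat)
          = L.drop ((reach + 1 - (s + 1)).toNat) := by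
        rw [hk, List.drop_succ_cons]
      rw [hdrop]
      by_cases hx : x = 'X'
      · subst hx
        have hAcont : (d.contains (s - 1) || d.contains (s - 2)) = true := by
          have : reach = s ∨ reach = s + 1 := by omega
          rcases this with h | h
          · have : d.contains (s - 2) = true :=
              (PySem.Dict.contains_iff_mem_keys _ _).2 (by rw [show s - 2 = reach - 2 by omega]; exact hmem)
            simp [this]
          · have : d.contains (s - 1) = true :=
              (PySem.Dict.contains_iff_mem_keys _ _).2 (by rw [show s - 1 = reach - 2 by omega]; exact hmem)
            simp [this]
        simp only [ne_eq, not_true_eq_false, if_false, hAcont, if_true]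
        exact ih (s + 1) d reach (by omega) hkeys (by omega) (Or.inr hmem)
      · rw [if_pos (by simpa using hx)]
        exact ih (s + 1) d reach (by omega) hkeys (by omega) (Or.inr hmem)

-- ===== VERDICT (by name: the statement is the Claim_ definition above) =====
theorem miniPatches_spec : Claim_equal_miniPatches := by
  intro S _
  show miniPatches S = miniPatches_alt S
  unfold miniPatches miniPatches_alt
  have := miniPatches_main S.toList 0 PySem.Dict.empty (-1) (by omega)
    (by intro k hk; simp [PySem.Dict.keys_empty] at hk)
    (by omega) (Or.inl ⟨PySem.Dict.keys_empty, rfl⟩)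
  simpa [PySem.Dict.values, PySem.Dict.empty, PySem.Dict.items] using this
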